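-- pv_equiv track=rewrite | github.com/unavailable-2374/Pan_TE | bin/Refiner/phase1_screening_optimized.py | _has_multiple_te_families_in_hits
-- ===== SOURCE A (Python) =====
-- from typing import Dict, List, Any, Tuple
--
-- def _has_multiple_te_families_in_hits(hits: List[Dict]) -> bool:
--     """检查RepeatMasker hits是否涉及多个TE家族"""
--     if len(hits) < 2:
--         return False
--
--     # 模拟检查：如果有多个高质量hits且相互不重叠，可能是嵌合体
--     # 实际实现中需要分析hits的family信息
--     high_quality_hits = [hit for hit in hits if hit.get('score', 0) > 200]
--
--     if len(high_quality_hits) >= 2: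
--         # 检查hits是否相互不重叠（简化版本）
--         sorted_hits = sorted(high_quality_hits, key=lambda x: x.get('start', 0))
--         for i in range(len(sorted_hits) - 1):
--             if sorted_hits[i].get('end', 0) < sorted_hits[i+1].get('start', 0):
--                 return True  # 发现不重叠的高质量hits
--
--     return False
-- ===== SOURCE B (Python) =====
-- from typing import Dict, List
--
--
-- def _extract_min_start(pool):
--     """One pass over the pool: return the earliest hit with minimal start,
--     plus all remaining hits in their original order."""
--     best = pool[0]
--     left, right = [], []  # remaining hits before / after the current best
--     for h in pool[1:]:
--         if h.get('start', 0) < best.get('start', 0):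
--             left.append(best)
--             left.extend(right)
--             right = []
--             best = h
--         else:
--             right.append(h)
--     return best, left + right
--
--
-- def _has_multiple_te_families_in_hits(hits: List[Dict]) -> bool:
--     """Selection-based: never sorts. Repeatedly extract the earliest
--     minimal-start high-quality hit from a shrinking pool and report a
--     strict gap between consecutive extracted hits."""
--     pool = [h for h in hits if h.get('score', 0) > 200]
--     if not pool:
--         return False
--     cur, pool = _extract_min_start(pool)
--     while pool:
--         nxt, pool = _extract_min_start(pool)
--         if cur.get('end', 0) < nxt.get('start', 0):
--             return True
--         cur = nxt
--     return False
-- ===== Notes on version B (the rewrite author's own statement) =====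
-- stated objective: alternative
-- what changed: B never builds a sorted list: it repeatedly extracts the earliest minimal-start high-quality hit from a shrinking pool (selection via a one-pass partition around the running best) and tests each extracted hit's end against the next extracted hit's start, instead of A's filter + library sort + indexed adjacent-pair scan.
import Mathlib
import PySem

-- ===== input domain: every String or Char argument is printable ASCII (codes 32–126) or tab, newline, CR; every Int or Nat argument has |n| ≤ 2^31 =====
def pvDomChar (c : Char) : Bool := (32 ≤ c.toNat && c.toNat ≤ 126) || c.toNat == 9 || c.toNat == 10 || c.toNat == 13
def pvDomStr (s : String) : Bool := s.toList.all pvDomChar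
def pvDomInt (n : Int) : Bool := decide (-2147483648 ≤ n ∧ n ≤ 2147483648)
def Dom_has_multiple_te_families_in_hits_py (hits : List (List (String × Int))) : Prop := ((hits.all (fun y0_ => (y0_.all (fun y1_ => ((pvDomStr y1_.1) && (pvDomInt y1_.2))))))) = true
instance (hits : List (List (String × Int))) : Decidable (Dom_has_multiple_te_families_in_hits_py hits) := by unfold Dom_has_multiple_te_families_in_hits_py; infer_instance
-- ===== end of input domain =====

-- B replaces A's filter + library sort + adjacent-pair index scan by repeated
-- extraction of the earliest minimal-start high-quality hit from a shrinking
-- pool (selection, no sorting), comparing consecutive extracted hits (objective: alternative).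


-- hit.get(k, 0) on a Python dict rendered as an association list
def hitGetD (hit : List (String × Int)) (k : String) : Int :=
  (PySem.Dict.mk hit).getD k 0

-- ===== PORT A =====
-- 'for i in range(len(sorted_hits)-1): if sorted_hits[i].get('end',0) < sorted_hits[i+1].get('start',0): return True'
-- — the index loop over adjacent pairs, as structural recursion on the sorted list
def aGapScan : List (List (String × Int)) → Bool
  | a :: b :: rest =>
      if hitGetD a "end" < hitGetD b "start" then true else aGapScan (b :: rest)
  | _ => false

def has_multiple_te_families_in_hits_py (hits : List (List (String × Int))) : Bool :=
  if hits.length < 2 then false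
  else
    let high_quality_hits := hits.filter (fun hit => hitGetD hit "score" > 200)
    if high_quality_hits.length ≥ 2 then
      let sorted_hits := PySem.List.sorted high_quality_hits (fun x => hitGetD x "start")
      aGapScan sorted_hits
    else false

-- ===== PORT B =====
-- the body of _extract_min_start's for-loop: state = (best, left, right)
def extractStep (s : List (String × Int) × List (List (String × Int)) × List (List (String × Int)))
    (h : List (String × Int)) :
    List (String × Int) × List (List (String × Int)) × List (List (String × Int)) :=
  if hitGetD h "start" < hitGetD s.1 "start" then (h, s.2.1 ++ [s.1] ++ s.2.2, [])
  else (s.1, s.2.1, s.2.2 ++ [h])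

-- _extract_min_start(pool) with pool = x :: t (Source B indexes pool[0] / pool[1:])
def extractMin (x : List (String × Int)) (t : List (List (String × Int))) :
    List (String × Int) × List (List (String × Int)) :=
  let s := t.foldl extractStep (x, [], [])
  (s.1, s.2.1 ++ s.2.2)

-- the foldl keeps |left| + |right| = number of hits consumed
lemma extractStep_foldl_len (t : List (List (String × Int)))
    (b0 : List (String × Int)) (l0 r0 : List (List (String × Int))) :
    ((t.foldl extractStep (b0, l0, r0)).2.1.length + (t.foldl extractStep (b0, l0, r0)).2.2.length)
      = l0.length + r0.length + t.length := by
  induction t generalizing b0 l0 r0 with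
  | nil => simp
  | cons h t ih =>
    simp only [List.foldl_cons, extractStep]
    by_cases hc : hitGetD h "start" < hitGetD b0 "start"
    · rw [if_pos hc, ih]; simp; omega
    · rw [if_neg hc, ih]; simp; omega

lemma extractMin_len (x : List (String × Int)) (t : List (List (String × Int))) :
    (extractMin x t).2.length = t.length := by
  unfold extractMin
  have := extractStep_foldl_len t x [] []
  simp at this ⊢
  omega

-- the while loop: cur = last extracted hit, pool = what remains
def bLoop (cur : List (String × Int)) : List (List (String × Int)) → Bool
  | [] => false
  | x :: t =>
      let s := extractMin x t
      if hitGetD cur "end" < hitGetD s.1 "start" then true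
      else bLoop s.1 s.2
termination_by pool => pool.length
decreasing_by
  simp only [extractMin_len]
  simp

def has_multiple_te_families_in_hits_py_alt (hits : List (List (String × Int))) : Bool :=
  match hits.filter (fun h => hitGetD h "score" > 200) with
  | [] => false
  | x :: t =>
      let s := extractMin x t
      bLoop s.1 s.2

-- ===== PRECONDITION & SPEC =====
def Spec_has_multiple_te_families_in_hits_py (hits : List (List (String × Int))) (out : Bool) : Prop := out = has_multiple_te_families_in_hits_py_alt hits
instance (hits : List (List (String × Int))) (out : Bool) : Decidable (Spec_has_multiple_te_families_in_hits_py hits out) := by unfold Spec_has_multiple_te_families_in_hits_py; infer_instance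

-- ===== CLAIM (what is proved, stated in full; the proofs are below) =====
def Claim_equal_has_multiple_te_families_in_hits_py : Prop := ∀ (hits : List (List (String × Int))), Dom_has_multiple_te_families_in_hits_py hits → Spec_has_multiple_te_families_in_hits_py hits (has_multiple_te_families_in_hits_py hits)

-- ===== LEMMAS AND PROOFS =====

-- invariant of the partition pass: left ++ [best] ++ right is the consumed input
lemma extractStep_foldl_inv (t : List (List (String × Int)))
    (b0 : List (String × Int)) (l0 r0 : List (List (String × Int))) :
    (t.foldl extractStep (b0, l0, r0)).2.1 ++ [(t.foldl extractStep (b0, l0, r0)).1]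
      ++ (t.foldl extractStep (b0, l0, r0)).2.2 = (l0 ++ [b0] ++ r0) ++ t := by
  induction t generalizing b0 l0 r0 with
  | nil => simp
  | cons h t ih =>
    simp only [List.foldl_cons, extractStep]
    by_cases hc : hitGetD h "start" < hitGetD b0 "start"
    · rw [if_pos hc, ih]; simp
    · rw [if_neg hc, ih]; simp

-- snoc characterisation of the extraction
lemma extractMin_snoc (x y : List (String × Int)) (t : List (List (String × Int))) :
    extractMin x (t ++ [y]) =
      if hitGetD y "start" < hitGetD (extractMin x t).1 "start"
      then (y, x :: t)
      else ((extractMin x t).1, (extractMin x t).2 ++ [y]) := by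
  unfold extractMin
  rw [List.foldl_append]
  simp only [List.foldl_cons, List.foldl_nil, extractStep]
  by_cases hc : hitGetD y "start" < hitGetD (t.foldl extractStep (x, [], [])).1 "start"
  · rw [if_pos hc, if_pos hc]
    have := extractStep_foldl_inv t x [] []
    simp only [List.nil_append] at this
    simp [this]
  · rw [if_neg hc, if_neg hc]
    simp

-- sorting a snoc is inserting the last element into the sorted prefix
lemma sorted_snoc (t : List (List (String × Int))) (y : List (String × Int)) :
    PySem.List.sorted (t ++ [y]) (fun h => hitGetD h "start") =
      PySem.List.insertBy (fun a b => decide (hitGetD a "start" < hitGetD b "start")) y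
        (PySem.List.sorted t (fun h => hitGetD h "start")) := by
  rw [PySem.List.sorted_eq_foldl_insertBy, PySem.List.sorted_eq_foldl_insertBy,
      List.foldl_append]
  rfl

-- SELECTION LEMMA: the stable sort's head is the first minimal-start element,
-- and its tail is the sort of the remainder
lemma sorted_eq_extract (x : List (String × Int)) (t : List (List (String × Int))) :
    PySem.List.sorted (x :: t) (fun h => hitGetD h "start") =
      (extractMin x t).1 :: PySem.List.sorted (extractMin x t).2 (fun h => hitGetD h "start") := by
  induction t using List.reverseRecOn with
  | nil => simp [extractMin, PySem.List.sorted, PySem.List.insertBy]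
  | append_singleton s y ih =>
    have hx : (x :: (s ++ [y])) = (x :: s) ++ [y] := by simp
    rw [hx, sorted_snoc, ih, extractMin_snoc]
    by_cases hc : hitGetD y "start" < hitGetD (extractMin x s).1 "start"
    · rw [if_pos hc]
      simp only [PySem.List.insertBy, hc, decide_true, if_pos]
      rw [ih]
    · rw [if_neg hc]
      simp only [PySem.List.insertBy, hc, decide_false]
      rw [sorted_snoc]
      simp

-- the while loop is A's adjacent scan on (cur :: sorted pool)
lemma bLoop_eq_aGapScan (pool : List (List (String × Int))) (cur : List (String × Int)) :
    bLoop cur pool = aGapScan (cur :: PySem.List.sorted pool (fun h => hitGetD h "start")) := by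
  induction cur, pool using bLoop.induct with
  | case1 cur => simp [bLoop, PySem.List.sorted, aGapScan]
  | case2 cur x t s hs =>
    rw [bLoop, sorted_eq_extract]
    have hs' : hitGetD cur "end" < hitGetD (extractMin x t).1 "start" := hs
    simp [aGapScan, hs']
  | case3 cur x t s hc ih =>
    rw [bLoop, sorted_eq_extract]
    simp only [aGapScan]
    rw [show bLoop (extractMin x t).1 (extractMin x t).2
        = aGapScan ((extractMin x t).1 :: PySem.List.sorted (extractMin x t).2 fun h => hitGetD h "start") from ih]

lemma aGapScan_short (l : List (List (String × Int))) (h : l.length < 2) :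
    aGapScan l = false := by
  match l, h with
  | [], _ => rfl
  | [a], _ => rfl

-- B computes A's adjacent scan of the sorted filtered list, with no length guards
lemma alt_eq_scan (hits : List (List (String × Int))) :
    has_multiple_te_families_in_hits_py_alt hits =
      aGapScan (PySem.List.sorted (hits.filter (fun h => hitGetD h "score" > 200))
        (fun h => hitGetD h "start")) := by
  unfold has_multiple_te_families_in_hits_py_alt
  cases hF : hits.filter (fun h => hitGetD h "score" > 200) with
  | nil => simp [PySem.List.sorted, aGapScan]
  | cons x t =>
    simp only
    rw [bLoop_eq_aGapScan, sorted_eq_extract]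

-- ===== VERDICT (by name: the statement is the Claim_ definition above) =====
theorem has_multiple_te_families_in_hits_py_spec : Claim_equal_has_multiple_te_families_in_hits_py := by
  intro hits _
  unfold Spec_has_multiple_te_families_in_hits_py
  rw [alt_eq_scan]
  unfold has_multiple_te_families_in_hits_py
  set p : List (String × Int) → Bool := fun hit => hitGetD hit "score" > 200 with hp
  by_cases h1 : hits.length < 2
  · have hf : (hits.filter p).length < 2 :=
      lt_of_le_of_lt (List.length_filter_le p hits) h1
    rw [if_pos h1, aGapScan_short _ (by rw [PySem.List.length_sorted]; exact hf)]
  · rw [if_neg h1]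
    by_cases h2 : (hits.filter p).length ≥ 2
    · simp only [h2, if_pos]
    · rw [if_neg h2, aGapScan_short _ (by rw [PySem.List.length_sorted]; omega)]
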